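-- pv_equiv track=rewrite | github.com/ThisIsHwang/for-PS | 프로그래머스/방의 개수.py | solution
-- ===== SOURCE A (Python) =====
-- def move(num):
--     if num == 0:
--         return (-1, 0)
--     elif num == 1:
--         return (-1, 1)
--     elif num == 2:
--         return (0, 1)
--     elif num == 3:
--         return (1, 1)
--     elif num == 4:
--         return (1, 0)
--     elif num == 5:
--         return (1, -1)
--     elif num == 6:
--         return (0, -1)
--     elif num == 7:
--         return (-1, -1)
--
-- def solution(arrows):
--     answer = 0
--     now = (0, 0)
--
--     visited = set()
--     visitedDir = set()
--
--     visited.add(now)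
--
--     for arrow in arrows:
--         for _ in range(2):
--             temp = now
--             now = (now[0] + move(arrow)[0], now[1] + move(arrow)[1])
--             if now in visited and (temp, now) not in visitedDir:
--                 answer += 1
--             visited.add(now)
--             visitedDir.add((temp, (temp[0] + move(arrow)[0], temp[1] + move(arrow)[1])))
--             visitedDir.add(((temp[0] + move(arrow)[0], temp[1] + move(arrow)[1]), temp))
--
--     return answer
-- ===== SOURCE B (Python) =====
-- _MOVES = {0: (-1, 0), 1: (-1, 1), 2: (0, 1), 3: (1, 1),
--           4: (1, 0), 5: (1, -1), 6: (0, -1), 7: (-1, -1)}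
--
-- def solution(arrows):
--     now = (0, 0)
--     points = {now}
--     edges = set()
--     for arrow in arrows:
--         dx, dy = _MOVES[arrow]
--         for _ in range(2):
--             nxt = (now[0] + dx, now[1] + dy)
--             points.add(nxt)
--             edges.add((now, nxt) if now <= nxt else (nxt, now))
--             now = nxt
--     return len(edges) - len(points) + 1
-- ===== Notes on version B (the rewrite author's own statement) =====
-- stated objective: simpler
-- what changed: B drops A's per-step cycle detection with a directed-edge set: it just collects the visited points and the distinct undirected edges (sorted pairs) during the doubled walk and returns the cyclomatic number len(edges) - len(points) + 1 of the single connected walk graph.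
-- outside the precondition, e.g. on solution([8]): A raises TypeError, B raises KeyError
import Mathlib
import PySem

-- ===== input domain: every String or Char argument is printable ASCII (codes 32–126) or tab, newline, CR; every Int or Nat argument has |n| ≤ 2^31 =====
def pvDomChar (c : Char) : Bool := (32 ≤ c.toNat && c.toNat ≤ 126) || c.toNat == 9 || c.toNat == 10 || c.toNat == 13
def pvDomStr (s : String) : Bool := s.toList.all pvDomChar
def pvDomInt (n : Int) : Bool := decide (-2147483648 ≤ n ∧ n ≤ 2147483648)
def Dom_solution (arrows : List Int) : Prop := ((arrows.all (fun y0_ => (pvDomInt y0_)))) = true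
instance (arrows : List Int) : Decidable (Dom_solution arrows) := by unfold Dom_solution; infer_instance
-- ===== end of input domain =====

-- B builds the visited-point set and the set of distinct undirected edges in one walk and
-- returns the cyclomatic number |E| - |V| + 1, instead of A's per-step cycle counting (objective: simpler).

-- ===== PORT A =====
-- Python `move` returns None for num outside 0..7, on which A then raises TypeError;
-- those inputs are excluded by Pre_solution, the (0,0) default is never reached there.
def move (num : Int) : Int × Int :=
  if num = 0 then (-1, 0)
  else if num = 1 then (-1, 1)
  else if num = 2 then (0, 1)
  else if num = 3 then (1, 1)
  else if num = 4 then (1, 0)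
  else if num = 5 then (1, -1)
  else if num = 6 then (0, -1)
  else if num = 7 then (-1, -1)
  else (0, 0)

-- state: (answer, now, visited, visitedDir)
def bodyA (arrow : Int)
    (st : Int × (Int × Int) × PySem.Set (Int × Int) × PySem.Set ((Int × Int) × (Int × Int))) :
    Int × (Int × Int) × PySem.Set (Int × Int) × PySem.Set ((Int × Int) × (Int × Int)) :=
  let (answer, now, visited, visitedDir) := st
  let temp := now
  let now' := (now.1 + (move arrow).1, now.2 + (move arrow).2)
  let answer' := if now' ∈ visited ∧ (temp, now') ∉ visitedDir then answer + 1 else answer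
  let visited' := PySem.Set.add visited now'
  let e2 := (temp.1 + (move arrow).1, temp.2 + (move arrow).2)
  let visitedDir' := PySem.Set.add (PySem.Set.add visitedDir (temp, e2)) (e2, temp)
  (answer', now', visited', visitedDir')

def solution (arrows : List Int) : Int :=
  (arrows.foldl
    (fun st arrow => (List.range 2).foldl (fun st _ => bodyA arrow st) st)
    (0, (0, 0), PySem.Set.add PySem.Set.empty (0, 0), PySem.Set.empty)).1

-- ===== PORT B =====
def movesB : PySem.Dict Int (Int × Int) :=
  PySem.Dict.ofList [(0, (-1, 0)), (1, (-1, 1)), (2, (0, 1)), (3, (1, 1)),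
                     (4, (1, 0)), (5, (1, -1)), (6, (0, -1)), (7, (-1, -1))]

-- `(now, nxt) if now <= nxt else (nxt, now)` — Python's lexicographic tuple order
def edgeKey (p q : Int × Int) : (Int × Int) × (Int × Int) :=
  if p.1 < q.1 ∨ (p.1 = q.1 ∧ p.2 ≤ q.2) then (p, q) else (q, p)

-- state: (now, points, edges)
def stepB (d : Int × Int)
    (st : (Int × Int) × PySem.Set (Int × Int) × PySem.Set ((Int × Int) × (Int × Int))) :
    (Int × Int) × PySem.Set (Int × Int) × PySem.Set ((Int × Int) × (Int × Int)) :=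
  let (now, points, edges) := st
  let nxt := (now.1 + d.1, now.2 + d.2)
  (nxt, PySem.Set.add points nxt, PySem.Set.add edges (edgeKey now nxt))

def solution_alt (arrows : List Int) : Int :=
  let fin := arrows.foldl
    (fun st arrow =>
      -- Python raises KeyError on arrow outside 0..7; excluded by Pre_solution
      let d := PySem.Dict.getD movesB arrow (0, 0)
      (List.range 2).foldl (fun st _ => stepB d st) st)
    ((0, 0), PySem.Set.add PySem.Set.empty (0, 0), PySem.Set.empty)
  (fin.2.2.length : Int) - (fin.2.1.length : Int) + 1

-- ===== PRECONDITION & SPEC =====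
-- A (and B) raises on any arrow outside 0..7 (move returns None / dict KeyError): excluded.
def Pre_solution (arrows : List Int) : Prop := ∀ a ∈ arrows, 0 ≤ a ∧ a ≤ 7
instance (arrows : List Int) : Decidable (Pre_solution arrows) := by unfold Pre_solution; infer_instance

def pvWitness_solution : List Int := [6, 6, 6, 4, 4, 4, 2, 2, 2, 0, 0, 0]

def Spec_solution (arrows : List Int) (out : Int) : Prop := out = solution_alt arrows
instance (arrows : List Int) (out : Int) : Decidable (Spec_solution arrows out) := by unfold Spec_solution; infer_instance

-- ===== CLAIM (what is proved, stated in full; the proofs are below) =====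
def Claim_equal_solution : Prop := ∀ (arrows : List Int), Dom_solution arrows → Pre_solution arrows → Spec_solution arrows (solution arrows)

-- ===== LEMMAS AND PROOFS =====

lemma movesB_getD (a : Int) : PySem.Dict.getD movesB a (0, 0) = move a := by
  by_cases h0 : a = 0; · subst h0; decide
  by_cases h1 : a = 1; · subst h1; decide
  by_cases h2 : a = 2; · subst h2; decide
  by_cases h3 : a = 3; · subst h3; decide
  by_cases h4 : a = 4; · subst h4; decide
  by_cases h5 : a = 5; · subst h5; decide
  by_cases h6 : a = 6; · subst h6; decide
  by_cases h7 : a = 7; · subst h7; decide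
  have hm : movesB = PySem.Dict.mk [(0, (-1, 0)), (1, (-1, 1)), (2, (0, 1)), (3, (1, 1)),
      (4, (1, 0)), (5, (1, -1)), (6, (0, -1)), (7, (-1, -1))] := by decide
  rw [hm, PySem.Dict.getD_eq_get?_getD]
  simp [move, h0, h1, h2, h3, h4, h5, h6, h7, Ne.symm h0, Ne.symm h1, Ne.symm h2,
    Ne.symm h3, Ne.symm h4, Ne.symm h5, Ne.symm h6, Ne.symm h7, PySem.Dict.get?, beq_iff_eq]

lemma edgeKey_eq_iff (p q t n : Int × Int) :
    edgeKey p q = edgeKey t n ↔ ((p = t ∧ q = n) ∨ (p = n ∧ q = t)) := by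
  obtain ⟨a, b⟩ := p; obtain ⟨c, d⟩ := q; obtain ⟨e, f⟩ := t; obtain ⟨g, h⟩ := n
  simp only [edgeKey, Prod.mk.injEq]
  split_ifs <;> simp only [Prod.mk.injEq] <;> omega

def WalkInv (sa : Int × (Int × Int) × PySem.Set (Int × Int) × PySem.Set ((Int × Int) × (Int × Int)))
    (sb : (Int × Int) × PySem.Set (Int × Int) × PySem.Set ((Int × Int) × (Int × Int))) : Prop :=
  sa.2.1 = sb.1 ∧ sa.2.2.1 = sb.2.1 ∧
  sa.1 = (sb.2.2.length : Int) - (sb.2.1.length : Int) + 1 ∧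
  sb.1 ∈ sb.2.1 ∧
  (∀ p q : Int × Int, (p, q) ∈ sa.2.2.2 → p ∈ sb.2.1 ∧ q ∈ sb.2.1) ∧
  (∀ p q : Int × Int, (p, q) ∈ sa.2.2.2 ↔ edgeKey p q ∈ sb.2.2)

lemma body_inv (arrow : Int) (sa : Int × (Int × Int) × PySem.Set (Int × Int) × PySem.Set ((Int × Int) × (Int × Int)))
    (sb : (Int × Int) × PySem.Set (Int × Int) × PySem.Set ((Int × Int) × (Int × Int)))
    (h : WalkInv sa sb) : WalkInv (bodyA arrow sa) (stepB (move arrow) sb) := by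
  obtain ⟨ans, now, vis, vd⟩ := sa
  obtain ⟨now2, pts, E⟩ := sb
  obtain ⟨h1, h2, h3, h4, h5, h6⟩ := h
  simp only at h1 h2 h3 h4 h5 h6
  subst h1; subst h2
  simp only [bodyA, stepB, WalkInv]
  refine ⟨trivial, trivial, ?_, ?_, ?_, ?_⟩
  · -- counting
    by_cases hvd : (now, (now.1 + (move arrow).1, now.2 + (move arrow).2)) ∈ vd
    · have hk := (h6 now _).1 hvd
      have hp := (h5 now _ hvd).2
      rw [PySem.Set.add_of_mem hk, PySem.Set.add_of_mem hp]
      simp [hvd, h3]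
    · have hk : edgeKey now (now.1 + (move arrow).1, now.2 + (move arrow).2) ∉ E :=
        fun hc => hvd ((h6 now _).2 hc)
      rw [PySem.Set.add_of_not_mem hk]
      by_cases hp : (now.1 + (move arrow).1, now.2 + (move arrow).2) ∈ vis
      · rw [PySem.Set.add_of_mem hp]
        simp only [hp, hvd, not_false_iff, and_self, if_true, List.length_append,
          List.length_cons, List.length_nil, h3]
        push_cast; ring
      · rw [PySem.Set.add_of_not_mem hp]
        simp only [hp, false_and, if_false, List.length_append, List.length_cons,
          List.length_nil, h3]
        push_cast; ring
  · simp [PySem.Set.mem_add]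
  · intro p q hpq
    simp only [PySem.Set.mem_add, Prod.mk.injEq] at hpq ⊢
    rcases hpq with (hpq | ⟨hp, hq⟩) | ⟨hp, hq⟩
    · exact ⟨Or.inl (h5 p q hpq).1, Or.inl (h5 p q hpq).2⟩
    · exact ⟨Or.inl (hp ▸ h4), Or.inr hq⟩
    · exact ⟨Or.inr hp, Or.inl (hq ▸ h4)⟩
  · intro p q
    simp only [PySem.Set.mem_add, h6 p q, edgeKey_eq_iff, Prod.mk.injEq]
    tauto

lemma foldl_inv (arrows : List Int)
    (sa : Int × (Int × Int) × PySem.Set (Int × Int) × PySem.Set ((Int × Int) × (Int × Int)))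
    (sb : (Int × Int) × PySem.Set (Int × Int) × PySem.Set ((Int × Int) × (Int × Int)))
    (h : WalkInv sa sb) :
    WalkInv (arrows.foldl (fun st arrow => (List.range 2).foldl (fun st _ => bodyA arrow st) st) sa)
        (arrows.foldl (fun st arrow =>
          (List.range 2).foldl (fun st _ => stepB (PySem.Dict.getD movesB arrow (0, 0)) st) st) sb) := by
  induction arrows generalizing sa sb with
  | nil => exact h
  | cons a rest ih =>
    apply ih
    show WalkInv _ _
    rw [show (List.range 2) = [0,1] from rfl]
    simp only [List.foldl, movesB_getD]
    exact body_inv a _ _ (body_inv a _ _ h)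

-- ===== VERDICT (by name: the statement is the Claim_ definition above) =====
theorem solution_spec : Claim_equal_solution := by
  intro arrows _ _
  unfold Spec_solution solution solution_alt
  have h := foldl_inv arrows (0, (0, 0), PySem.Set.add PySem.Set.empty (0, 0), PySem.Set.empty)
      ((0, 0), PySem.Set.add PySem.Set.empty (0, 0), PySem.Set.empty) ?base
  · exact h.2.2.1
  · refine ⟨rfl, rfl, by decide, by decide, ?_, ?_⟩ <;> intro p q <;> simp [PySem.Set.empty]
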